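-- pv_equiv track=rewrite | github.com/AdayahLogic/FORGE | core/coder.py | mark_first_pending_task_complete
-- ===== SOURCE A (Python) =====
-- def mark_first_pending_task_complete(task_queue: list) -> list:
--     updated_queue = []
--
--     completed_one = False
--
--     for task in task_queue:
--         updated_task = dict(task)
--
--         if not completed_one and updated_task.get("status") == "pending":
--             updated_task["status"] = "completed"
--             completed_one = True
--
--         updated_queue.append(updated_task)
--
--     return updated_queue
-- ===== SOURCE B (Python) =====
-- def mark_first_pending_task_complete(task_queue: list) -> list:
--     idx = next((i for i, t in enumerate(task_queue) if t.get("status") == "pending"), None)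
--     updated = [dict(t) for t in task_queue]
--     if idx is not None:
--         updated[idx]["status"] = "completed"
--     return updated
-- ===== Notes on version B (the rewrite author's own statement) =====
-- stated objective: simpler
-- what changed: Replaces the stateful single pass (completed_one flag with an in-loop branch) by an index-locating scan (next over enumerate) followed by a uniform copy comprehension and one targeted in-place update.
import Mathlib
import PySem

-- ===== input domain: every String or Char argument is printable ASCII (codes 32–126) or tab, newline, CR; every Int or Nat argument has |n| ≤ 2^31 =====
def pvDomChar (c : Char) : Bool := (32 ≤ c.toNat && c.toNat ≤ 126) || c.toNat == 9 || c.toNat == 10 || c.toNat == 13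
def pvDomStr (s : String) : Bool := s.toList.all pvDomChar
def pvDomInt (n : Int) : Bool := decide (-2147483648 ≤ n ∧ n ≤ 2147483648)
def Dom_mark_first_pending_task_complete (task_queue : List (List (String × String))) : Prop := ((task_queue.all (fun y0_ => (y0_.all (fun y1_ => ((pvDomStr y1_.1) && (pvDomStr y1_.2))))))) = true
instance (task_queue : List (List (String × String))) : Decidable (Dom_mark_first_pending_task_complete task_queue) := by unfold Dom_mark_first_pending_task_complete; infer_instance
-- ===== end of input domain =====

-- ===== PORT A =====
-- B locates the first pending index in one scan, copies every task uniformly, then updates that one index;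
-- A carries a completed_one flag through a single stateful pass. Equivalence proved on the full domain.
def markGoA : Bool → List (List (String × String)) → List (List (String × String))
  | _, [] => []
  | flag, t :: rest =>
    let d := PySem.Dict.ofList t
    if !flag && (d.get? "status" == some "pending") then
      (d.insert "status" "completed").items :: markGoA true rest
    else
      d.items :: markGoA flag rest

def mark_first_pending_task_complete (task_queue : List (List (String × String))) : List (List (String × String)) :=
  markGoA false task_queue

-- ===== PORT B =====
def mark_first_pending_task_complete_alt (task_queue : List (List (String × String))) : List (List (String × String)) :=
  let idx := task_queue.findIdx? (fun t => (PySem.Dict.ofList t).get? "status" == some "pending")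
  let updated := task_queue.map (fun t => (PySem.Dict.ofList t).items)
  match idx with
  | none => updated
  | some i => updated.modify i (fun d => ((PySem.Dict.mk d).insert "status" "completed").items)

-- ===== PRECONDITION & SPEC =====
def Spec_mark_first_pending_task_complete (task_queue : List (List (String × String))) (out : List (List (String × String))) : Prop := out = mark_first_pending_task_complete_alt task_queue
instance (task_queue : List (List (String × String))) (out : List (List (String × String))) : Decidable (Spec_mark_first_pending_task_complete task_queue out) := by unfold Spec_mark_first_pending_task_complete; infer_instance

-- ===== CLAIM (what is proved, stated in full; the proofs are below) =====
def Claim_equal_mark_first_pending_task_complete : Prop := ∀ (task_queue : List (List (String × String))), Dom_mark_first_pending_task_complete task_queue → Spec_mark_first_pending_task_complete task_queue (mark_first_pending_task_complete task_queue)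

-- ===== LEMMAS AND PROOFS =====

-- ===== VERDICT (by name: the statement is the Claim_ definition above) =====
theorem markGoA_true (l : List (List (String × String))) :
    markGoA true l = l.map (fun t => (PySem.Dict.ofList t).items) := by
  induction l with
  | nil => rfl
  | cons t rest ih => simp [markGoA, ih]

theorem markA_eq_alt (l : List (List (String × String))) :
    markGoA false l = mark_first_pending_task_complete_alt l := by
  induction l with
  | nil => rfl
  | cons t rest ih =>
    by_cases h : ((PySem.Dict.ofList t).get? "status" == some "pending") = true
    · simp [markGoA, mark_first_pending_task_complete_alt, List.findIdx?_cons, h,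
        List.modify, markGoA_true]
    · simp only [markGoA, mark_first_pending_task_complete_alt, List.findIdx?_cons, h] at *
      simp only [Bool.not_false, Bool.true_and, ih]
      cases hf : rest.findIdx? (fun t => (PySem.Dict.ofList t).get? "status" == some "pending") with
      | none => simp
      | some i => simp [List.modify]

theorem mark_first_pending_task_complete_spec : Claim_equal_mark_first_pending_task_complete := by
  intro q _
  unfold Spec_mark_first_pending_task_complete mark_first_pending_task_complete
  exact markA_eq_alt q
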